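-- pv_equiv track=rewrite | github.com/CrdGiu/Communities_modularity | Population.py | getPhenoo
-- ===== SOURCE A (Python) =====
-- def getPhenoo(geno):
-- 	t = []
-- 	for i in range(len(geno)):
-- 		t.append([])
-- 		st = bin(geno[i])
-- 		for j in range(len(st)):
-- 			if(st[len(st)-j-1] == '1'):
-- 				t[i].append(j+1)
--
-- 	return t
-- ===== SOURCE B (Python) =====
-- def getPhenoo(geno):
--     res = []
--     for x in geno:
--         n = abs(x)
--         pos = 1
--         bits = []
--         while n:
--             if n & 1:
--                 bits.append(pos)
--             n >>= 1
--             pos += 1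
--         res.append(bits)
--     return res
-- ===== Notes on version B (the rewrite author's own statement) =====
-- stated objective: idiomatic
-- what changed: B extracts 1-indexed set-bit positions by arithmetic (abs, n&1, n>>=1) instead of building the bin() string and scanning its characters from the right.
import Mathlib
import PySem

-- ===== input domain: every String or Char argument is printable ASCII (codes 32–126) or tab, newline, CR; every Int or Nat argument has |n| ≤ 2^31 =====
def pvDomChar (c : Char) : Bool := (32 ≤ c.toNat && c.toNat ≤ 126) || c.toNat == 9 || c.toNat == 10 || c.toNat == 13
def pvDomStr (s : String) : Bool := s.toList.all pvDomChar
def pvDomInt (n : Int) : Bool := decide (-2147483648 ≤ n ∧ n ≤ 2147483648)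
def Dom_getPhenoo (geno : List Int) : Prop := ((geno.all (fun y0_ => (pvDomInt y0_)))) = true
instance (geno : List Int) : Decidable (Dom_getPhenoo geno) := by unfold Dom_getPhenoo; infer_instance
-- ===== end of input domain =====

-- B replaces A's bin()-string scan by an arithmetic shift loop over |x|; same values, no string building.

-- ===== PORT A =====
-- bin(n) digit part for a natural number, most-significant bit first (hand port; exact:
-- Python's bin builds these digits, '' for 0 handled by pyBin below which emits '0b0').
def pvBinDigits : Nat → List Char
  | 0 => []
  | (n+1) => pvBinDigits ((n+1)/2) ++ [if (n+1) % 2 = 1 then '1' else '0']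
decreasing_by exact Nat.div_lt_self (Nat.succ_pos n) (by omega)

-- bin(x) as a character list: '-0b…' for negatives, '0b…' otherwise, '0b0' for 0 (hand port, exact).
def pvBin (x : Int) : List Char :=
  (if x < 0 then ['-','0','b'] else ['0','b']) ++
  (if x = 0 then ['0'] else pvBinDigits x.natAbs)

-- A's inner loop: for j in range(len(st)): if st[len(st)-j-1]=='1': append j+1
def pvRowA (x : Int) : List Int :=
  let st := pvBin x
  (List.range st.length).foldl
    (fun acc j => if st.getD (st.length - j - 1) ' ' = '1' then acc ++ [(j : Int) + 1] else acc) []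

def getPhenoo (geno : List Int) : List (List Int) :=
  geno.foldl (fun t x => t ++ [pvRowA x]) []

-- ===== PORT B =====
-- while n: if n & 1: append pos; n >>= 1; pos += 1   (n & 1 = n % 2, n >> 1 = n / 2 on Nat)
def pvBitPos : Nat → Int → List Int
  | 0, _ => []
  | (n+1), pos => (if (n+1) % 2 = 1 then [pos] else []) ++ pvBitPos ((n+1)/2) (pos+1)
decreasing_by exact Nat.div_lt_self (Nat.succ_pos n) (by omega)

def getPhenoo_alt (geno : List Int) : List (List Int) :=
  geno.map (fun x => pvBitPos x.natAbs 1)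

-- ===== PRECONDITION & SPEC =====
def Spec_getPhenoo (geno : List Int) (out : List (List Int)) : Prop := out = getPhenoo_alt geno
instance (geno : List Int) (out : List (List Int)) : Decidable (Spec_getPhenoo geno out) := by unfold Spec_getPhenoo; infer_instance

-- ===== CLAIM (what is proved, stated in full; the proofs are below) =====
def Claim_equal_getPhenoo : Prop := ∀ (geno : List Int), Dom_getPhenoo geno → Spec_getPhenoo geno (getPhenoo geno)

-- ===== LEMMAS AND PROOFS =====

-- 1-indexed positions (offset pos) of '1' in a character list
def pvOnes : List Char → Int → List Int
  | [], _ => []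
  | (c::cs), pos => (if c = '1' then [pos] else []) ++ pvOnes cs (pos+1)

theorem pvOnes_append (l l2 : List Char) : ∀ pos : Int,
    pvOnes (l ++ l2) pos = pvOnes l pos ++ pvOnes l2 (pos + l.length) := by
  induction l with
  | nil => intro pos; simp [pvOnes]
  | cons c cs ih =>
    intro pos
    simp [pvOnes, ih (pos+1)]
    ring_nf

-- A's reverse-indexed scan is the forward scan of the reversed string
theorem pvRow_eq_ones (x : Int) : pvRowA x = pvOnes ((pvBin x).reverse) 1 := by
  show (List.range (pvBin x).length).foldl
    (fun acc j => if (pvBin x).getD ((pvBin x).length - j - 1) ' ' = '1'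
                  then acc ++ [(j : Int) + 1] else acc) [] = _
  generalize pvBin x = st
  -- fold over range picks rev elements in order
  have key : ∀ (l : List Char) (acc : List Int) (pos : Int),
      (List.range l.length).foldl
        (fun acc j => if l.reverse.getD j ' ' = '1' then acc ++ [(j : Int) + 1] else acc) acc
      = acc ++ pvOnes l.reverse 1 := by
    intro l
    generalize hr : l.reverse = r
    have hl : l.length = r.length := by rw [← hr]; simp
    rw [hl]; clear hr hl
    intro acc pos
    -- induction on r from the right, using range_succ
    clear pos
    induction r using List.reverseRecOn generalizing acc with
    | nil => simp [pvOnes]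
    | append_singleton r c ih =>
      simp only [List.length_append, List.length_cons, List.length_nil, List.range_succ,
        List.foldl_append, List.foldl_cons, List.foldl_nil]
      have hcong : (List.range r.length).foldl
          (fun acc j => if (r ++ [c]).getD j ' ' = '1' then acc ++ [(j : Int) + 1] else acc) acc
        = (List.range r.length).foldl
          (fun acc j => if r.getD j ' ' = '1' then acc ++ [(j : Int) + 1] else acc) acc := by
        apply PySem.List.foldl_congr_mem
        intro a j hj
        have hjlt : j < r.length := List.mem_range.mp hj
        have : (r ++ [c]).getD j ' ' = r.getD j ' ' := by
          simp [List.getD, List.getElem?_append_left hjlt]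
        rw [this]
      rw [hcong, ih]
      have hc : (r ++ [c]).getD r.length ' ' = c := by
        simp [List.getD]
      rw [hc, pvOnes_append]
      simp [pvOnes]
      split_ifs with h
      · simp [add_comm]
      · simp
  have hidx : ∀ (acc : List Int),
      (List.range st.length).foldl
        (fun acc j => if st.getD (st.length - j - 1) ' ' = '1' then acc ++ [(j : Int) + 1] else acc) acc
      = (List.range st.length).foldl
        (fun acc j => if st.reverse.getD j ' ' = '1' then acc ++ [(j : Int) + 1] else acc) acc := by
    intro acc
    apply PySem.List.foldl_congr_mem
    intro a j hj
    have hjlt : j < st.length := List.mem_range.mp hj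
    have : st.getD (st.length - j - 1) ' ' = st.reverse.getD j ' ' := by
      have h1 : st.length - j - 1 < st.length := by omega
      have h2 : j < st.reverse.length := by simpa using hjlt
      simp only [List.getD, List.getElem?_eq_getElem h1, List.getElem?_eq_getElem h2]
      have he : st.length - j - 1 = st.length - 1 - j := by omega
      rw [List.getElem_reverse]
      simp only [Option.getD_some]
      congr 1
    rw [this]
  rw [hidx, key st [] 1]
  simp

-- the prefix (reversed) contributes nothing: no '1' among '-','0','b'
theorem pvOnes_prefix (x : Int) (pos : Int) :
    pvOnes ((if x < 0 then ['-','0','b'] else ['0','b']).reverse) pos = [] := by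
  split_ifs <;> simp [pvOnes]

-- digits of n, reversed, scanned for '1's = the shift loop
theorem pvOnes_digits (n : Nat) : ∀ pos : Int,
    pvOnes ((pvBinDigits n).reverse) pos = pvBitPos n pos := by
  induction n using Nat.strong_induction_on with
  | _ n ih =>
    intro pos
    match n with
    | 0 => simp [pvBinDigits, pvOnes, pvBitPos]
    | (m+1) =>
      rw [pvBinDigits, pvBitPos]
      simp only [List.reverse_append, List.reverse_singleton, List.singleton_append]
      rw [pvOnes]
      rw [ih ((m+1)/2) (Nat.div_lt_self (Nat.succ_pos m) (by omega)) (pos+1)]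
      congr 1
      by_cases h : (m+1) % 2 = 1
      · simp [h]
      · simp [h]

theorem pvRow_eq_bitPos (x : Int) : pvRowA x = pvBitPos x.natAbs 1 := by
  rw [pvRow_eq_ones, pvBin]
  rw [List.reverse_append, pvOnes_append]
  rw [pvOnes_prefix]
  by_cases hx : x = 0
  · subst hx; simp [pvOnes, pvBitPos]
  · simp only [if_neg hx]
    rw [pvOnes_digits]
    simp

-- ===== VERDICT (by name: the statement is the Claim_ definition above) =====
theorem getPhenoo_spec : Claim_equal_getPhenoo := by
  intro geno _
  show getPhenoo geno = getPhenoo_alt geno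
  unfold getPhenoo getPhenoo_alt
  rw [PySem.List.foldl_append_singleton_eq_map]
  exact List.map_congr_left (fun x _ => pvRow_eq_bitPos x)
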